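-- pv_equiv track=rewrite | github.com/coala/coala | coalib/parsing/Globbing.py | _position_is_bracketed
-- ===== SOURCE A (Python) =====
-- def _end_of_set_index(string, start_index):
--     """
--     Returns the position of the appropriate closing bracket for a glob set in
--     string.
--
--     :param string:      Glob string with wildcards
--     :param start_index: Index at which the set starts, meaning the position
--                         right behind the opening bracket
--     :return:            Position of appropriate closing bracket
--     """
--     length = len(string)
--     closing_index = start_index
--     if closing_index < length and string[closing_index] == '!':
--         closing_index += 1
--
--     if closing_index < length:  # the set cannot be closed by a bracket here
--         closing_index += 1
--
--     while closing_index < length and string[closing_index] != ']':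
--         closing_index += 1
--
--     return closing_index
--
-- def _position_is_bracketed(string, position):
--     """
--     Tests whether the char at string[position] is inside a valid pair of
--     brackets (and therefore loses its special meaning)
--
--     :param string:   Glob string with wildcards
--     :param position: Position of a char in string
--     :return:         Whether or not the char is inside a valid set of brackets
--     """
--     # allow negative positions and trim too long ones
--     position = len(string[:position])
--
--     index, length = 0, len(string)
--     while index < position:
--         char = string[index]
--         index += 1
--         if char == '[':
--             closing_index = _end_of_set_index(string, index)
--             if closing_index < length:
--                 if index <= position < closing_index:
--                     return True
--                 index = closing_index + 1
--             else:
--                 return False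
--     return False
-- ===== SOURCE B (Python) =====
-- def _position_is_bracketed(string, position):
--     # Character-driven DFA that fills a per-index boolean mask of
--     # "inside a closed bracket set", then answers by a lookup.
--     n = len(string)
--     mask = [False] * n
--     state = 0  # 0 outside, 1 just after '[', 2 just after '[!', 3 in set body
--     start = 0
--     i = 0
--     while i < n:
--         ch = string[i]
--         if state == 0:
--             if ch == '[':
--                 state = 1
--                 start = i + 1
--         elif state == 1:
--             state = 2 if ch == '!' else 3
--         elif state == 2:
--             state = 3
--         else:
--             if ch == ']':
--                 for k in range(start, i):
--                     mask[k] = True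
--                 state = 0
--         i += 1
--     pos = len(string[:position])
--     return pos < n and mask[pos]
-- ===== Notes on version B (the rewrite author's own statement) =====
-- stated objective: alternative
-- what changed: B replaces A's index-jumping scan with helper _end_of_set_index by a character-at-a-time 4-state DFA that fills a per-index boolean mask of 'inside a closed set' over the whole string and then answers the query by a single mask lookup.
import Mathlib
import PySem

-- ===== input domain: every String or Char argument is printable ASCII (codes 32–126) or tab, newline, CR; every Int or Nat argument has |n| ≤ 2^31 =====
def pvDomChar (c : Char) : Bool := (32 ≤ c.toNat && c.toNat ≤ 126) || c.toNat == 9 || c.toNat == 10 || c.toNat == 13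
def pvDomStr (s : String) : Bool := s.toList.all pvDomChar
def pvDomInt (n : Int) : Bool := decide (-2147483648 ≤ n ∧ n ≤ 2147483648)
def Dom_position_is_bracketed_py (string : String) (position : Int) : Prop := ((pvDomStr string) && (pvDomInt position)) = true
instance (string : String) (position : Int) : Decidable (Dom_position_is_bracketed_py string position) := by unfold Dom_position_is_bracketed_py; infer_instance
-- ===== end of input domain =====

-- B replaces A's index-jumping scan (helper _end_of_set_index) by a 4-state
-- character DFA that fills a per-index 'inside a closed set' mask, then looks up
-- the queried position (alternative decomposition, same cost).


-- ===== PORT A =====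
-- the trailing while-loop of _end_of_set_index
def pvEndScanA (cs : List Char) (i : Nat) : Nat :=
  if i < cs.length then
    if cs.getD i ' ' ≠ ']' then pvEndScanA cs (i + 1) else i
  else i
termination_by cs.length - i

-- closing_index after the optional '!' skip
def pvSetStartA (cs : List Char) (start : Nat) : Nat :=
  if start < cs.length ∧ cs.getD start ' ' = '!' then start + 1 else start

-- closing_index after the mandatory first set character
def pvSetBodyA (cs : List Char) (start : Nat) : Nat :=
  if pvSetStartA cs start < cs.length then pvSetStartA cs start + 1 else pvSetStartA cs start

-- _end_of_set_index
def pvEndSetA (cs : List Char) (start : Nat) : Nat :=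
  pvEndScanA cs (pvSetBodyA cs start)

theorem pvEndScanA_ge (cs : List Char) (i : Nat) : i ≤ pvEndScanA cs i := by
  fun_induction pvEndScanA cs i with
  | case1 i h1 h2 ih => omega
  | case2 => omega
  | case3 => omega

theorem pvEndSetA_ge (cs : List Char) (start : Nat) : start ≤ pvEndSetA cs start := by
  have h1 := pvEndScanA_ge cs (pvSetBodyA cs start)
  unfold pvEndSetA pvSetBodyA pvSetStartA at *
  split_ifs at * <;> omega

-- the main while-loop of _position_is_bracketed
def pvLoopA (cs : List Char) (pos index : Nat) : Bool :=
  if index < pos then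
    if cs.getD index ' ' = '[' then
      if pvEndSetA cs (index + 1) < cs.length then
        if index + 1 ≤ pos ∧ pos < pvEndSetA cs (index + 1) then true
        else pvLoopA cs pos (pvEndSetA cs (index + 1) + 1)
      else false
    else pvLoopA cs pos (index + 1)
  else false
termination_by pos - index
decreasing_by
  · have := pvEndSetA_ge cs (index + 1); omega
  · omega

def position_is_bracketed_py (string : String) (position : Int) : Bool :=
  pvLoopA string.toList (PySem.List.slice string.toList none (some position)).length 0

-- ===== PORT B =====
-- Source B's inner for-loop: mark mask[k] := True for k in range(start, stop)
def pvMarkB (mask : List Bool) (start stop : Nat) : List Bool :=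
  (PySem.List.pyRange (Int.ofNat start) (Int.ofNat stop) 1).foldl
    (fun m k => m.set k.toNat true) mask

-- Source B's main while-loop: the 4-state DFA over the characters, filling the mask
def pvRunB (cs : List Char) (state start i : Nat) (mask : List Bool) : List Bool :=
  if i < cs.length then
    let ch := cs.getD i ' '
    if state = 0 then
      if ch = '[' then pvRunB cs 1 (i + 1) (i + 1) mask
      else pvRunB cs 0 start (i + 1) mask
    else if state = 1 then
      pvRunB cs (if ch = '!' then 2 else 3) start (i + 1) mask
    else if state = 2 then
      pvRunB cs 3 start (i + 1) mask
    else
      if ch = ']' then pvRunB cs 0 start (i + 1) (pvMarkB mask start i)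
      else pvRunB cs 3 start (i + 1) mask
  else mask
termination_by cs.length - i

def position_is_bracketed_py_alt (string : String) (position : Int) : Bool :=
  let cs := string.toList
  let mask := pvRunB cs 0 0 0 (List.replicate cs.length false)
  let pos := (PySem.List.slice cs none (some position)).length
  decide (pos < cs.length) && mask.getD pos false

-- ===== PRECONDITION & SPEC =====
def Spec_position_is_bracketed_py (string : String) (position : Int) (out : Bool) : Prop := out = position_is_bracketed_py_alt string position
instance (string : String) (position : Int) (out : Bool) : Decidable (Spec_position_is_bracketed_py string position out) := by unfold Spec_position_is_bracketed_py; infer_instance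

-- ===== CLAIM (what is proved, stated in full; the proofs are below) =====
def Claim_equal_position_is_bracketed_py : Prop := ∀ (string : String) (position : Int), Dom_position_is_bracketed_py string position → Spec_position_is_bracketed_py string position (position_is_bracketed_py string position)

-- ===== LEMMAS AND PROOFS =====

-- proof-side characterization: the list of bracket-set intervals of cs from index i
def pvParseP (cs : List Char) (i : Nat) : List (Nat × Nat) :=
  if i < cs.length then
    if cs.getD i ' ' ≠ '[' then pvParseP cs (i + 1)
    else if pvEndSetA cs (i + 1) < cs.length then
      (i + 1, pvEndSetA cs (i + 1)) :: pvParseP cs (pvEndSetA cs (i + 1) + 1)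
    else []
  else []
termination_by cs.length - i
decreasing_by
  · omega
  · have := pvEndSetA_ge cs (i + 1); omega

theorem pvParseP_open_gt (cs : List Char) (i : Nat) (o c : Nat)
    (h : (o, c) ∈ pvParseP cs i) : i < o := by
  fun_induction pvParseP cs i with
  | case1 i h1 h2 ih => have := ih h; omega
  | case2 i h1 h2 h3 ih =>
      rcases List.mem_cons.mp h with h' | h'
      · cases h'; omega
      · have := ih h'
        have := pvEndSetA_ge cs (i + 1)
        omega
  | case3 i h1 h2 h3 => simp at h
  | case4 i h1 => simp at h

theorem pvParseP_close_lt (cs : List Char) (i : Nat) (o c : Nat)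
    (h : (o, c) ∈ pvParseP cs i) : c < cs.length := by
  fun_induction pvParseP cs i with
  | case1 i h1 h2 ih => exact ih h
  | case2 i h1 h2 h3 ih =>
      rcases List.mem_cons.mp h with h' | h'
      · cases h'; exact h3
      · exact ih h'
  | case3 i h1 h2 h3 => simp at h
  | case4 i h1 => simp at h

theorem pvSliceLen_le (cs : List Char) (p : Int) :
    (PySem.List.slice cs none (some p)).length ≤ cs.length := by
  simp only [PySem.List.slice]
  simp

-- A's interleaved loop equals the any-over-intervals characterization
theorem pvLoop_eq_parse (cs : List Char) (pos : Nat) (hpos : pos ≤ cs.length) (index : Nat) :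
    pvLoopA cs pos index = (pvParseP cs index).any (fun p => decide (p.1 ≤ pos ∧ pos < p.2)) := by
  fun_induction pvLoopA cs pos index with
  | case1 index h hc hcl hin =>
      have hidx : index < cs.length := by omega
      rw [pvParseP, if_pos hidx, if_neg (by simpa using hc), if_pos hcl]
      simp [hin.1, hin.2]
  | case2 index h hc hcl hin ih =>
      have hidx : index < cs.length := by omega
      rw [pvParseP, if_pos hidx, if_neg (by simpa using hc), if_pos hcl]
      simp only [List.any_cons, ih]
      simp [decide_eq_true_eq]
      omega
  | case3 index h hc hcl =>
      have hidx : index < cs.length := by omega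
      rw [pvParseP, if_pos hidx, if_neg (by simpa using hc), if_neg hcl]
      simp
  | case4 index h hc ih =>
      have hidx : index < cs.length := by omega
      rw [pvParseP, if_pos hidx, if_pos (by simpa using hc)]
      exact ih
  | case5 index h =>
      symm
      simp only [List.any_eq_false]
      rintro ⟨o, c⟩ hm
      have := pvParseP_open_gt cs index o c hm
      simp [decide_eq_true_eq]
      omega

-- mask marking: length and lookup
theorem pvMarkB_length (m : List Bool) (a b : Nat) : (pvMarkB m a b).length = m.length := by
  unfold pvMarkB
  generalize PySem.List.pyRange (Int.ofNat a) (Int.ofNat b) 1 = l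
  induction l generalizing m with
  | nil => rfl
  | cons x xs ih => simpa using ih (m.set x.toNat true)

theorem pvSetGetD (l : List Bool) (i j : Nat) (a d : Bool) :
    (l.set i a).getD j d = if i = j ∧ i < l.length then a else l.getD j d := by
  rcases Nat.lt_or_ge j l.length with h | h
  · rw [List.getD_eq_getElem?_getD, List.getD_eq_getElem?_getD, List.getElem?_set]
    split_ifs with h1 h2 h3 <;> simp_all
  · rw [List.getD_eq_getElem?_getD, List.getD_eq_getElem?_getD]
    rw [List.getElem?_eq_none (by simpa using h), List.getElem?_eq_none (by omega)]
    split_ifs with h1 <;> [omega; rfl]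

theorem pvFoldlSet_getD (l : List Int) (m : List Bool) (k : Nat) :
    (l.foldl (fun m x => m.set x.toNat true) m).getD k false
      = if (∃ x ∈ l, x.toNat = k) ∧ k < m.length then true else m.getD k false := by
  induction l generalizing m with
  | nil => simp
  | cons x xs ih =>
      simp only [List.foldl_cons]
      rw [ih, List.length_set, pvSetGetD]
      by_cases hR : k < m.length
      · by_cases hP : ∃ y ∈ xs, y.toNat = k
        · obtain ⟨y, hy, hyk⟩ := hP
          rw [if_pos ⟨⟨y, hy, hyk⟩, hR⟩, if_pos ⟨⟨y, List.mem_cons_of_mem x hy, hyk⟩, hR⟩]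
        · rw [if_neg (fun h => hP h.1)]
          by_cases hQ : x.toNat = k
          · rw [if_pos ⟨hQ, by omega⟩, if_pos ⟨⟨x, by simp, hQ⟩, hR⟩]
          · rw [if_neg (by rintro ⟨h1, -⟩; exact hQ h1), if_neg ?_]
            rintro ⟨⟨y, hy, hyk⟩, -⟩
            rcases List.mem_cons.mp hy with rfl | hy'
            · exact hQ hyk
            · exact hP ⟨y, hy', hyk⟩
      · rw [if_neg (by rintro ⟨-, h2⟩; exact hR h2),
          if_neg (by rintro ⟨h1, h2⟩; exact hR (h1 ▸ h2)),
          if_neg (by rintro ⟨-, h2⟩; exact hR h2)]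

theorem pvMarkB_getD (a b : Nat) (m : List Bool) (k : Nat) (hb : b ≤ m.length) :
    (pvMarkB m a b).getD k false = if a ≤ k ∧ k < b then true else m.getD k false := by
  unfold pvMarkB
  rw [pvFoldlSet_getD]
  have hmem : (∃ x ∈ PySem.List.pyRange (Int.ofNat a) (Int.ofNat b) 1, x.toNat = k) ↔
      (a ≤ k ∧ k < b) := by
    constructor
    · rintro ⟨x, hx, rfl⟩
      have := PySem.List.mem_pyRange_one.mp hx
      simp only [Int.ofNat_eq_natCast] at this
      omega
    · rintro ⟨h1, h2⟩
      exact ⟨Int.ofNat k, PySem.List.mem_pyRange_one.mpr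
        (by simp only [Int.ofNat_eq_natCast]; omega), by simp⟩
  split_ifs with h1 h2 h3 <;> first | rfl | (exfalso; rw [hmem] at *; omega)

-- one-step unfoldings of B's DFA loop
theorem pvStep0a {cs : List Char} {i st : Nat} {m : List Bool}
    (h : i < cs.length) (hc : cs.getD i ' ' = '[') :
    pvRunB cs 0 st i m = pvRunB cs 1 (i + 1) (i + 1) m := by
  rw [List.getD_eq_getElem?_getD] at hc; rw [pvRunB, if_pos h]; simp [List.getD_eq_getElem?_getD, hc]

theorem pvStep0b {cs : List Char} {i st : Nat} {m : List Bool}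
    (h : i < cs.length) (hc : cs.getD i ' ' ≠ '[') :
    pvRunB cs 0 st i m = pvRunB cs 0 st (i + 1) m := by
  rw [List.getD_eq_getElem?_getD] at hc; rw [pvRunB, if_pos h]; simp [List.getD_eq_getElem?_getD, hc]

theorem pvStep1 {cs : List Char} {i st : Nat} {m : List Bool} (h : i < cs.length) :
    pvRunB cs 1 st i m = pvRunB cs (if cs.getD i ' ' = '!' then 2 else 3) st (i + 1) m := by
  rw [pvRunB, if_pos h]; simp

theorem pvStep2 {cs : List Char} {i st : Nat} {m : List Bool} (h : i < cs.length) :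
    pvRunB cs 2 st i m = pvRunB cs 3 st (i + 1) m := by
  rw [pvRunB, if_pos h]; simp

theorem pvStep3a {cs : List Char} {i st : Nat} {m : List Bool}
    (h : i < cs.length) (hc : cs.getD i ' ' = ']') :
    pvRunB cs 3 st i m = pvRunB cs 0 st (i + 1) (pvMarkB m st i) := by
  rw [List.getD_eq_getElem?_getD] at hc; rw [pvRunB, if_pos h]; simp [List.getD_eq_getElem?_getD, hc]

theorem pvStep3b {cs : List Char} {i st : Nat} {m : List Bool}
    (h : i < cs.length) (hc : cs.getD i ' ' ≠ ']') :
    pvRunB cs 3 st i m = pvRunB cs 3 st (i + 1) m := by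
  rw [List.getD_eq_getElem?_getD] at hc; rw [pvRunB, if_pos h]; simp [List.getD_eq_getElem?_getD, hc]

theorem pvStepEnd {cs : List Char} {s i st : Nat} {m : List Bool} (h : ¬ i < cs.length) :
    pvRunB cs s st i m = m := by
  rw [pvRunB, if_neg h]

-- the in-set phase of B's DFA runs to the closing bracket found by pvEndScanA
theorem pvRunB_inset (cs : List Char) (j start : Nat) (m : List Bool) :
    pvRunB cs 3 start j m =
      if pvEndScanA cs j < cs.length
      then pvRunB cs 0 start (pvEndScanA cs j + 1) (pvMarkB m start (pvEndScanA cs j))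
      else m := by
  fun_induction pvEndScanA cs j with
  | case1 j h1 h2 ih => rw [pvStep3b h1 h2]; exact ih
  | case2 j h1 h2 => rw [pvStep3a h1 (not_not.mp h2), if_pos h1]
  | case3 j h1 => rw [pvStepEnd h1, if_neg h1]

-- the header phase of B's DFA (just after '[') reaches the end of the set
theorem pvRunB_open (cs : List Char) (o : Nat) (m : List Bool) :
    pvRunB cs 1 o o m =
      if pvEndSetA cs o < cs.length
      then pvRunB cs 0 o (pvEndSetA cs o + 1) (pvMarkB m o (pvEndSetA cs o))
      else m := by
  by_cases ho : o < cs.length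
  · rw [pvStep1 ho]
    by_cases hbang : cs.getD o ' ' = '!'
    · rw [if_pos hbang]
      have hs : pvSetStartA cs o = o + 1 := if_pos ⟨ho, hbang⟩
      by_cases h1 : o + 1 < cs.length
      · have he : pvEndSetA cs o = pvEndScanA cs (o + 2) := by
          unfold pvEndSetA pvSetBodyA; rw [hs, if_pos h1]
        rw [pvStep2 h1, he, pvRunB_inset cs (o + 2) o m]
      · have he : pvEndSetA cs o = o + 1 := by
          unfold pvEndSetA pvSetBodyA; rw [hs, if_neg h1, pvEndScanA, if_neg h1]
        rw [pvStepEnd h1, he, if_neg h1]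
    · rw [if_neg hbang]
      have hs : pvSetStartA cs o = o := if_neg (by tauto)
      have he : pvEndSetA cs o = pvEndScanA cs (o + 1) := by
        unfold pvEndSetA pvSetBodyA; rw [hs, if_pos ho]
      rw [he, pvRunB_inset cs (o + 1) o m]
  · have hs : pvSetStartA cs o = o := if_neg (by tauto)
    have he : pvEndSetA cs o = o := by
      unfold pvEndSetA pvSetBodyA; rw [hs, if_neg ho, pvEndScanA, if_neg ho]
    rw [pvStepEnd ho, he, if_neg ho]

-- the OUT phase of B's DFA: the final mask is the initial one plus all parsed intervals
theorem pvRunB_getD (cs : List Char) (pos : Nat) (i st : Nat) (m : List Bool)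
    (hlen : m.length = cs.length) :
    (pvRunB cs 0 st i m).getD pos false
      = (m.getD pos false || (pvParseP cs i).any (fun p => decide (p.1 ≤ pos ∧ pos < p.2))) := by
  fun_induction pvParseP cs i generalizing st m with
  | case1 i h1 h2 ih =>
      rw [pvStep0b h1 h2]
      exact ih st m hlen
  | case2 i h1 h2 h3 ih =>
      rw [pvStep0a h1 (not_not.mp h2), pvRunB_open cs (i + 1) m, if_pos h3]
      rw [ih (i + 1) _ (by rw [pvMarkB_length]; exact hlen)]
      rw [pvMarkB_getD _ _ _ _ (by omega)]
      by_cases hc : i + 1 ≤ pos ∧ pos < pvEndSetA cs (i + 1)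
      · simp [hc.1, hc.2]
      · rw [if_neg hc]
        simp only [List.any_cons]
        rw [show decide (i + 1 ≤ pos ∧ pos < pvEndSetA cs (i + 1)) = false by
          simpa using hc]
        simp
  | case3 i h1 h2 h3 =>
      rw [pvStep0a h1 (not_not.mp h2), pvRunB_open cs (i + 1) m, if_neg h3]
      simp
  | case4 i h1 =>
      rw [pvStepEnd h1]
      simp

-- ===== VERDICT (by name: the statement is the Claim_ definition above) =====
theorem position_is_bracketed_py_spec : Claim_equal_position_is_bracketed_py := by
  intro string position _
  unfold Spec_position_is_bracketed_py position_is_bracketed_py position_is_bracketed_py_alt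
  have hp := pvSliceLen_le string.toList position
  dsimp only
  rw [pvLoop_eq_parse string.toList _ hp 0]
  rw [pvRunB_getD string.toList _ 0 0 _ (by simp)]
  rw [show (List.replicate string.toList.length false).getD
        (PySem.List.slice string.toList none (some position)).length false = false by
      simp [List.getD_eq_getElem?_getD, List.getElem?_replicate]
      split_ifs <;> simp]
  rcases Bool.eq_false_or_eq_true ((pvParseP string.toList 0).any fun p =>
      decide (p.1 ≤ (PySem.List.slice string.toList none (some position)).length ∧
        (PySem.List.slice string.toList none (some position)).length < p.2)) with hA | hA
  · rw [hA]
    obtain ⟨⟨o, c⟩, hm, hoc⟩ := List.any_eq_true.mp hA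
    have hcl := pvParseP_close_lt string.toList 0 o c hm
    simp only [decide_eq_true_eq] at hoc
    have hL : string.toList.length = string.length := by simp
    simp
    omega
  · rw [hA]
    simp
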